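-- pv_equiv track=rewrite | github.com/suramya-biswas-git/python-study | PancardSort.py | panSort
-- ===== SOURCE A (Python) =====
-- def panSort(pancard):
--       digit=[]
--       alpha=[]
--       for stg in pancard :
--          if stg.isdigit():
--            digit.append(stg)
--
--          if stg.isalpha():
--            alpha.append(stg)
--
--       digit.sort()
--       alpha.sort(reverse=True)
--       newpan=""
--       for x in digit:
--         newpan=newpan+x
--
--       for x in alpha:
--        newpan=newpan+x
--       return newpan
-- ===== SOURCE B (Python) =====
-- def panSort(pancard):
--     # counting sort over the fixed 62-char alphabet: digits ascending, letters descending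
--     order = "0123456789zyxwvutsrqponmlkjihgfedcbaZYXWVUTSRQPONMLKJIHGFEDCBA"
--     return "".join(c * pancard.count(c) for c in order)
-- ===== Notes on version B (the rewrite author's own statement) =====
-- stated objective: faster
-- what changed: Replaces filter-then-comparison-sort plus char-by-char string concatenation with a counting sort over the fixed 62-character alphabet (one pancard.count per alphabet char, then one join).
import Mathlib
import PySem

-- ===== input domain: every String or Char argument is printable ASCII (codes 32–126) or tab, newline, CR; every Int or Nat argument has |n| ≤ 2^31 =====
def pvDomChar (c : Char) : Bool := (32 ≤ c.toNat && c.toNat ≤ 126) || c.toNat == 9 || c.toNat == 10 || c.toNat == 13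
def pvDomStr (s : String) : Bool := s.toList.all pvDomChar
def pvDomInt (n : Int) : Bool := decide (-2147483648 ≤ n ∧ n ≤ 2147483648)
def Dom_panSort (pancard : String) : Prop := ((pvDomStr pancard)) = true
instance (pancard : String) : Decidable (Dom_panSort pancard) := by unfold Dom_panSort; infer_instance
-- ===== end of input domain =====

-- B replaces A's filter + comparison sorts + char-by-char concatenation with a counting
-- sort over the fixed 62-char alphabet (one count per alphabet char, one join); measurably faster.


-- ===== PORT A =====
def panSort (pancard : String) : String :=
  let acc := pancard.toList.foldl
    (fun (s : List Char × List Char) stg =>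
      let s := if PySem.Chars.isdigit stg then (s.1 ++ [stg], s.2) else s
      if PySem.Chars.isalpha stg then (s.1, s.2 ++ [stg]) else s)
    ([], [])
  let digit := PySem.List.sorted acc.1 (fun x => x) false
  let alpha := PySem.List.sorted acc.2 (fun x => x) true
  let newpan : List Char := digit.foldl (fun np x => np ++ [x]) []
  let newpan := alpha.foldl (fun np x => np ++ [x]) newpan
  String.mk newpan

-- ===== PORT B =====
def panOrder : String := "0123456789zyxwvutsrqponmlkjihgfedcbaZYXWVUTSRQPONMLKJIHGFEDCBA"

def panSort_alt (pancard : String) : String :=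
  String.mk (panOrder.toList.flatMap
    (fun c => PySem.List.pyRepeat [c] ((PySem.Str.count pancard (String.mk [c]) : Int))))

-- ===== PRECONDITION & SPEC =====
def Spec_panSort (pancard : String) (out : String) : Prop := out = panSort_alt pancard
instance (pancard : String) (out : String) : Decidable (Spec_panSort pancard out) := by unfold Spec_panSort; infer_instance

-- ===== CLAIM (what is proved, stated in full; the proofs are below) =====
def Claim_equal_panSort : Prop := ∀ (pancard : String), Dom_panSort pancard → Spec_panSort pancard (panSort pancard)

-- ===== LEMMAS AND PROOFS =====

theorem char_eq_of_toNat {c d : Char} (h : c.toNat = d.toNat) : c = d :=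
  Char.ext (UInt32.toNat_inj.mp h)

theorem char_mem_of_toNat_mem {c : Char} {ds : List Char}
    (h : c.toNat ∈ ds.map Char.toNat) : c ∈ ds := by
  induction ds with
  | nil => simp at h
  | cons d t ih =>
    simp only [List.map_cons, List.mem_cons] at h ⊢
    rcases h with h | h
    · exact Or.inl (char_eq_of_toNat h)
    · exact Or.inr (ih h)

def panDigits : List Char := ['0','1','2','3','4','5','6','7','8','9']

def panLetters : List Char :=
  ['z','y','x','w','v','u','t','s','r','q','p','o','n','m','l','k','j','i','h','g','f','e','d','c','b','a',
   'Z','Y','X','W','V','U','T','S','R','Q','P','O','N','M','L','K','J','I','H','G','F','E','D','C','B','A']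

theorem panOrder_split : panOrder.toList = panDigits ++ panLetters := by decide

-- str.count with a single-char needle is the char count
theorem count_go_singleton (c : Char) (fuel : Nat) :
    ∀ (l : List Char) (acc : Nat), l.length ≤ fuel →
      PySem.Chars.count.go [c] fuel l acc = acc + l.count c := by
  induction fuel with
  | zero =>
    intro l acc h
    have : l = [] := List.eq_nil_of_length_eq_zero (Nat.le_zero.mp h)
    subst this; simp [PySem.Chars.count.go]
  | succ n ih =>
    intro l acc h
    cases l with
    | nil => simp [PySem.Chars.count.go]
    | cons x t =>
      simp only [PySem.Chars.count.go]
      by_cases hp : [c].isPrefixOf (x :: t) = true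
      · have hcx : c = x := by
          simpa [List.isPrefixOf] using hp
        rw [if_pos hp]
        have := ih t (acc + 1) (by simpa using h)
        simpa [hcx, List.count_cons, Nat.add_comm, Nat.add_assoc, Nat.add_left_comm] using this
      · have hcx : ¬ c = x := by
          intro hc; exact hp (by simp [List.isPrefixOf, hc])
        rw [if_neg hp]
        have := ih t acc (by simpa using Nat.le_of_succ_le_succ (by simpa using h))
        simpa [List.count_cons, Ne.symm hcx, hcx] using this

theorem str_count_singleton (s : String) (c : Char) :
    PySem.Str.count s (String.mk [c]) = s.toList.count c := by
  rw [PySem.Str.count_eq]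
  have h1 : (String.mk [c]).toList = [c] :=
    Eq.symm (String.ofList_eq.mp rfl)
  rw [h1]
  simp only [PySem.Chars.count, List.isEmpty, if_neg (by simp : ¬ (false = true))]
  simpa using count_go_singleton c s.toList.length s.toList 0 (Nat.le_refl _)

-- counting how often v occurs in the concatenation of count-replicates
theorem count_flatMap_replicate (al : List Char) (hnd : al.Nodup) (n : Char → Nat) (v : Char) :
    (al.flatMap fun c => List.replicate (n c) c).count v = if v ∈ al then n v else 0 := by
  induction al with
  | nil => simp
  | cons d t ih =>
    have hnd' : t.Nodup := hnd.of_cons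
    have hdt : d ∉ t := by simp [List.nodup_cons] at hnd; exact hnd.1
    simp only [List.flatMap_cons, List.count_append, List.count_replicate, ih hnd']
    by_cases hv : v = d
    · subst hv; simp [hdt]
    · simp [Ne.symm hv, hv]

-- the concatenation of count-replicates over a pairwise-related alphabet is pairwise ordered
theorem flat_counts_pairwise {lt le : Char → Char → Prop}
    (hrefl : ∀ c, le c c) (hmono : ∀ a b, lt a b → le a b)
    (al : List Char) (n : Char → Nat) (hal : al.Pairwise lt) :
    (al.flatMap fun c => List.replicate (n c) c).Pairwise le := by
  induction al with
  | nil => simp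
  | cons d t ih =>
    rcases List.pairwise_cons.mp hal with ⟨hd, ht⟩
    simp only [List.flatMap_cons]
    apply List.pairwise_append.mpr
    refine ⟨List.pairwise_replicate.mpr (Or.inr (hrefl d)), ih ht, ?_⟩
    intro x hx y hy
    obtain ⟨cy, hcy, hycy⟩ := List.mem_flatMap.mp hy
    rw [List.eq_of_mem_replicate hx, List.eq_of_mem_replicate hycy]
    exact hmono _ _ (hd _ hcy)

-- counting-sort characterisation, ascending
theorem sorted_eq_flat_counts (al xs : List Char)
    (hal : al.Pairwise (· < ·)) (hsub : ∀ c ∈ xs, c ∈ al) :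
    PySem.List.sorted xs (fun x => x) false
      = al.flatMap (fun c => List.replicate (xs.count c) c) := by
  have hnd : al.Nodup := hal.imp (fun h => ne_of_lt h)
  apply PySem.List.eq_of_perm_of_pairwise_le_of_injective (fun x : Char => x)
    (fun a b h => h)
  · refine (PySem.List.sorted_perm xs (fun x => x) false).trans ?_
    apply List.perm_iff_count.mpr
    intro v
    rw [count_flatMap_replicate al hnd _ v]
    by_cases hv : v ∈ al
    · simp [hv]
    · have : v ∉ xs := fun hx => hv (hsub v hx)
      simp [hv, List.count_eq_zero.mpr this]
  · exact PySem.List.sorted_pairwise xs (fun x => x)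
  · exact flat_counts_pairwise (le := (· ≤ ·)) (fun c => le_refl c)
      (fun a b h => le_of_lt h) al _ hal

-- counting-sort characterisation, descending (reverse=True)
theorem sorted_rev_eq_flat_counts (al xs : List Char)
    (hal : al.Pairwise (· > ·)) (hsub : ∀ c ∈ xs, c ∈ al) :
    PySem.List.sorted xs (fun x => x) true
      = al.flatMap (fun c => List.replicate (xs.count c) c) := by
  have hnd : al.Nodup := hal.imp (fun h => ne_of_gt h)
  apply PySem.List.eq_of_perm_of_pairwise_le_of_injective (fun c : Char => -(c.toNat : Int))
    (fun a b h => char_eq_of_toNat (by simp only at h; omega))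
  · refine (PySem.List.sorted_perm xs (fun x => x) true).trans ?_
    apply List.perm_iff_count.mpr
    intro v
    rw [count_flatMap_replicate al hnd _ v]
    by_cases hv : v ∈ al
    · simp [hv]
    · have : v ∉ xs := fun hx => hv (hsub v hx)
      simp [hv, List.count_eq_zero.mpr this]
  · refine (PySem.List.sorted_pairwise_rev xs (fun x => x)).imp ?_
    intro a b h
    have hba : b.toNat ≤ a.toNat := h
    omega
  · refine flat_counts_pairwise (le := fun a b => -(a.toNat : Int) ≤ -(b.toNat : Int))
      (fun c => le_refl _) ?_ al _ hal
    intro a b h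
    have hba : b.toNat ≤ a.toNat := le_of_lt h
    omega

set_option maxRecDepth 8192 in
theorem panSort_eq (pancard : String) : panSort pancard = panSort_alt pancard := by
  have hfun : (fun (s : List Char × List Char) stg =>
      let s := if PySem.Chars.isdigit stg then (s.1 ++ [stg], s.2) else s
      if PySem.Chars.isalpha stg then (s.1, s.2 ++ [stg]) else s)
      = (fun (s : List Char × List Char) stg =>
      (if PySem.Chars.isdigit stg then s.1 ++ [stg] else s.1,
       if PySem.Chars.isalpha stg then s.2 ++ [stg] else s.2)) := by
    funext s stg
    by_cases h1 : PySem.Chars.isdigit stg <;> by_cases h2 : PySem.Chars.isalpha stg <;>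
      simp [h1, h2]
  have hsubd : ∀ c ∈ pancard.toList.filter PySem.Chars.isdigit, c ∈ panDigits := by
    intro c hc
    have h : PySem.Chars.isdigit c = true := (List.mem_filter.mp hc).2
    simp only [PySem.Chars.isdigit, Bool.and_eq_true, decide_eq_true_eq] at h
    have hv : 48 ≤ c.toNat ∧ c.toNat ≤ 57 := ⟨h.1, h.2⟩
    apply char_mem_of_toNat_mem
    have e : panDigits.map Char.toNat = [48,49,50,51,52,53,54,55,56,57] := rfl
    rw [e]; simp only [List.mem_cons, List.not_mem_nil, or_false]; omega
  have hsuba : ∀ c ∈ pancard.toList.filter PySem.Chars.isalpha, c ∈ panLetters := by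
    intro c hc
    have h : PySem.Chars.isalpha c = true := (List.mem_filter.mp hc).2
    simp only [PySem.Chars.isalpha, PySem.Chars.isupper, PySem.Chars.islower,
      Bool.or_eq_true, Bool.and_eq_true, decide_eq_true_eq] at h
    have hv : (65 ≤ c.toNat ∧ c.toNat ≤ 90) ∨ (97 ≤ c.toNat ∧ c.toNat ≤ 122) := by
      rcases h with h | h
      · exact Or.inl ⟨h.1, h.2⟩
      · exact Or.inr ⟨h.1, h.2⟩
    apply char_mem_of_toNat_mem
    have e : panLetters.map Char.toNat = [122,121,120,119,118,117,116,115,114,113,112,111,110,109,108,107,106,105,104,103,102,101,100,99,98,97,90,89,88,87,86,85,84,83,82,81,80,79,78,77,76,75,74,73,72,71,70,69,68,67,66,65] := rfl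
    rw [e]; simp only [List.mem_cons, List.not_mem_nil, or_false]; omega
  unfold panSort panSort_alt
  simp only [hfun]
  rw [PySem.List.foldl_prod_mk
      (f := fun acc stg => if PySem.Chars.isdigit stg then acc ++ [stg] else acc)
      (g := fun acc stg => if PySem.Chars.isalpha stg then acc ++ [stg] else acc)]
  simp only [PySem.List.foldl_append_if_eq_filter, List.nil_append,
    PySem.List.foldl_append_singleton_eq_self]
  rw [sorted_eq_flat_counts panDigits _ (by decide) hsubd,
      sorted_rev_eq_flat_counts panLetters _ (by decide) hsuba,
      panOrder_split, List.flatMap_append]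
  simp only [PySem.List.pyRepeat_singleton, str_count_singleton, Int.toNat_natCast]
  have hdd : ∀ c ∈ panDigits, PySem.Chars.isdigit c = true := by
    unfold panDigits; intro c hc; fin_cases hc <;> decide
  have hll : ∀ c ∈ panLetters, PySem.Chars.isalpha c = true := by
    unfold panLetters; intro c hc; fin_cases hc <;> decide
  congr 1
  congr 1
  · exact List.flatMap_congr (fun c hc => by rw [List.count_filter (hdd c hc)])
  · exact List.flatMap_congr (fun c hc => by rw [List.count_filter (hll c hc)])

-- ===== VERDICT (by name: the statement is the Claim_ definition above) =====
theorem panSort_spec : Claim_equal_panSort := by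
  intro pancard _
  exact panSort_eq pancard
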